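-- pv_equiv track=rewrite | github.com/nico386d/2048Game | game_engine.py | compress_and_merge
-- ===== SOURCE A (Python) =====
-- from typing import List, Tuple
--
-- SIZE = 4
--
-- def compress_and_merge(line: List[int]) -> Tuple[List[int], int, bool]:
--     original = list(line)
--     nums = [x for x in line if x != 0]
--     gained = 0
--     merged: List[int] = []
--     i = 0
--     while i < len(nums):
--         if i + 1 < len(nums) and nums[i] == nums[i + 1]:
--             val = nums[i] * 2
--             merged.append(val)
--             gained += val
--             i += 2
--         else:
--             merged.append(nums[i])
--             i += 1
--     merged += [0] * (SIZE - len(merged))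
--     return merged, gained, (merged != original)
-- ===== SOURCE B (Python) =====
-- from typing import List, Tuple
--
-- SIZE = 4
--
-- def compress_and_merge(line: List[int]) -> Tuple[List[int], int, bool]:
--     original = list(line)
--     nums = [x for x in line if x != 0]
--     gained = 0
--     merged: List[int] = []
--     blocked = False  # True right after a merge: that tile may not merge again
--     for x in nums:
--         if merged and not blocked and merged[-1] == x:
--             merged[-1] *= 2
--             gained += merged[-1]
--             blocked = True
--         else:
--             merged.append(x)
--             blocked = False
--     merged += [0] * (SIZE - len(merged))
--     return merged, gained, (merged != original)
-- ===== Notes on version B (the rewrite author's own statement) =====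
-- stated objective: alternative
-- what changed: Replaces the index-based look-ahead while loop (i, i+1, i+=2) with a single for-each pass that merges look-back into the output list, guarded by a blocked flag that prevents a freshly merged tile from merging again.
import Mathlib
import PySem

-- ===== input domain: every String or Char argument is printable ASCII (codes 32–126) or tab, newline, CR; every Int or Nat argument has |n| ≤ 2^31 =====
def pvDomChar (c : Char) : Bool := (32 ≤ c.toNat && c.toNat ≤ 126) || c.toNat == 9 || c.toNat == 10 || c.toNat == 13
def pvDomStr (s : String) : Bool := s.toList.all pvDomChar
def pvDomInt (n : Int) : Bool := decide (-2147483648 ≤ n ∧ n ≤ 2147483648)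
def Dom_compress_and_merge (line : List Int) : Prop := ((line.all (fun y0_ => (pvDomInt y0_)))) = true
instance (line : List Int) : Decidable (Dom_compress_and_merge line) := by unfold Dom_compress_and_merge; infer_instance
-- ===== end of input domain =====

-- B replaces A's index-based look-ahead merge loop with a single look-back pass
-- guarded by a 'blocked' flag; alternative decomposition, same cost, return value only.

-- ===== PORT A =====
-- the while loop over index i, as the obvious structural recursion on nums
def mergeLoopA : List Int → List Int × Int
  | [] => ([], 0)
  | [a] => ([a], 0)
  | a :: b :: rest =>
    if a = b then
      let p := mergeLoopA rest
      (a * 2 :: p.1, a * 2 + p.2)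
    else
      let p := mergeLoopA (b :: rest)
      (a :: p.1, p.2)

def compress_and_merge (line : List Int) : List Int × Int × Bool :=
  let nums := line.filter (fun x => x ≠ 0)
  let p := mergeLoopA nums
  let merged := p.1 ++ List.replicate (4 - p.1.length) 0
  (merged, p.2, decide (merged ≠ line))

-- ===== PORT B =====
-- one forward pass: state (merged, gained, blocked)
def stepB (st : List Int × Int × Bool) (x : Int) : List Int × Int × Bool :=
  if st.2.2 = false ∧ st.1.getLast? = some x then
    (st.1.dropLast ++ [2 * x], st.2.1 + 2 * x, true)
  else
    (st.1 ++ [x], st.2.1, false)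

def compress_and_merge_alt (line : List Int) : List Int × Int × Bool :=
  let nums := line.filter (fun x => x ≠ 0)
  let st := nums.foldl stepB ([], 0, false)
  let merged := st.1 ++ List.replicate (4 - st.1.length) 0
  (merged, st.2.1, decide (merged ≠ line))

-- ===== PRECONDITION & SPEC =====
def Spec_compress_and_merge (line : List Int) (out : List Int × Int × Bool) : Prop := out = compress_and_merge_alt line
instance (line : List Int) (out : List Int × Int × Bool) : Decidable (Spec_compress_and_merge line out) := by unfold Spec_compress_and_merge; infer_instance

-- ===== CLAIM (what is proved, stated in full; the proofs are below) =====
def Claim_equal_compress_and_merge : Prop := ∀ (line : List Int), Dom_compress_and_merge line → Spec_compress_and_merge line (compress_and_merge line)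

-- ===== LEMMAS AND PROOFS =====

theorem stepB_true (m : List Int) (g : Int) (a : Int) :
    stepB (m, g, true) a = (m ++ [a], g, false) := by
  simp [stepB]

theorem stepB_false_last (m : List Int) (g : Int) (a b : Int) :
    stepB (m ++ [a], g, false) b =
      if a = b then (m ++ [2 * b], g + 2 * b, true) else (m ++ [a] ++ [b], g, false) := by
  unfold stepB
  simp only [List.getLast?_concat]
  by_cases h : a = b
  · subst h
    rw [if_pos (by exact ⟨trivial, rfl⟩), if_pos rfl, List.dropLast_concat]
  · rw [if_neg (by simp [h]), if_neg h]

theorem fold_true : ∀ (nums m : List Int) (g : Int),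
    (nums.foldl stepB (m, g, true)).1 = m ++ (mergeLoopA nums).1 ∧
    (nums.foldl stepB (m, g, true)).2.1 = g + (mergeLoopA nums).2
  | [], m, g => by simp [mergeLoopA]
  | [a], m, g => by simp [List.foldl, stepB_true, mergeLoopA]
  | a :: b :: rest, m, g => by
    rw [List.foldl_cons, stepB_true, List.foldl_cons, stepB_false_last]
    by_cases hab : a = b
    · subst hab
      rw [if_pos rfl]
      have ih := fold_true rest (m ++ [2 * a]) (g + 2 * a)
      rw [ih.1, ih.2]
      simp [mergeLoopA, mul_comm]
      ring
    · rw [if_neg hab]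
      have ih := fold_true (b :: rest) (m ++ [a]) g
      rw [List.foldl_cons, stepB_true] at ih
      rw [ih.1, ih.2]
      simp [mergeLoopA, if_neg hab]

theorem fold_false_eq_true (nums : List Int) :
    (nums.foldl stepB ([], 0, false)).1 = (nums.foldl stepB (([] : List Int), 0, true)).1 ∧
    (nums.foldl stepB ([], 0, false)).2.1 = (nums.foldl stepB (([] : List Int), 0, true)).2.1 := by
  cases nums with
  | nil => simp
  | cons a t => simp [List.foldl, stepB]

-- ===== VERDICT (by name: the statement is the Claim_ definition above) =====
theorem compress_and_merge_spec : Claim_equal_compress_and_merge := by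
  intro line _
  unfold Spec_compress_and_merge compress_and_merge compress_and_merge_alt
  simp only []
  have h1 := fold_false_eq_true (line.filter (fun x => x ≠ 0))
  have h2 := fold_true (line.filter (fun x => x ≠ 0)) [] 0
  simp only [List.nil_append, zero_add] at h2
  rw [h1.1, h1.2, h2.1, h2.2]
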